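-- pv_equiv track=rewrite | github.com/rmednitzer/core-graph | tests/test_label_safety_coverage.py | _closes_triple
-- ===== SOURCE A (Python) =====
-- def _closes_triple(line: str) -> bool:
--     """Check if a line both opens and closes a triple-quoted f-string."""
--     for quote in ('"""', "'''"):
--         marker = "f" + quote
--         idx = line.find(marker)
--         if idx >= 0:
--             rest = line[idx + len(marker) :]
--             if quote in rest:
--                 return True
--     return False
-- ===== SOURCE B (Python) =====
-- def _closes_triple(line: str) -> bool:
--     """Split the line on each triple quote: some split piece other than the
--     last two ends with 'f' exactly when an f-triple opener is later closed."""
--     return any(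
--         any(part.endswith("f") for part in line.split(quote)[:-2])
--         for quote in ('"""', "'''")
--     )
-- ===== Notes on version B (the rewrite author's own statement) =====
-- stated objective: alternative
-- what changed: Instead of locating the first f-marker with find and testing substring membership in the remaining slice, B splits the whole line on each triple quote once and checks whether any split piece before the last two ends with 'f' (a piece ending in 'f' is exactly an f-opener whose separator is followed by at least one more closing triple).
import Mathlib
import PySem

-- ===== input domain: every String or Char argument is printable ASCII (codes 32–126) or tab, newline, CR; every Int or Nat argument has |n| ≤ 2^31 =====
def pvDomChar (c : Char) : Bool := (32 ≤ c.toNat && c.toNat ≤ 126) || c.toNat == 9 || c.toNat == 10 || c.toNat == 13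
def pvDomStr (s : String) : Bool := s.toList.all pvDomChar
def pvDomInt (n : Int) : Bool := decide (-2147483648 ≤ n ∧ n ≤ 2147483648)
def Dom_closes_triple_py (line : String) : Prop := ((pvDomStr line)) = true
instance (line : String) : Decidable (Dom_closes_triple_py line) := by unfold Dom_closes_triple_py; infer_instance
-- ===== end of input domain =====

-- B replaces A's find-the-marker / slice / substring-membership search by a single
-- str.split on each triple quote: some split piece before the last two ends with 'f'
-- exactly when an f-opener is later closed (objective: alternative).

-- ===== PORT A =====
-- one iteration of A's `for quote in ('"""', "'''")` body
def pvACheck (s : List Char) (quote : List Char) : Bool :=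
  let marker := 'f' :: quote
  let idx := PySem.Chars.find s marker
  if 0 ≤ idx then
    let rest := PySem.Chars.slice s (some (idx + (marker.length : Int))) none
    PySem.Chars.isIn quote rest
  else false

def closes_triple_py (line : String) : Bool :=
  if pvACheck line.toList ['"', '"', '"'] then true
  else if pvACheck line.toList ['\'', '\'', '\''] then true
  else false

-- ===== PORT B =====
-- Source B's inner generator: any(part.endswith("f") for part in line.split(quote)[:-2])
def pvBCheck (s : List Char) (quote : List Char) : Bool :=
  (PySem.List.slice (PySem.Chars.splitOn s quote) none (some (-2))).any
    (fun part => PySem.Chars.endswith part ['f'])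

def closes_triple_py_alt (line : String) : Bool :=
  pvBCheck line.toList ['"', '"', '"'] || pvBCheck line.toList ['\'', '\'', '\'']

-- ===== PRECONDITION & SPEC =====
def Spec_closes_triple_py (line : String) (out : Bool) : Prop := out = closes_triple_py_alt line
instance (line : String) (out : Bool) : Decidable (Spec_closes_triple_py line out) := by unfold Spec_closes_triple_py; infer_instance

-- ===== CLAIM (what is proved, stated in full; the proofs are below) =====
def Claim_equal_closes_triple_py : Prop := ∀ (line : String), Dom_closes_triple_py line → Spec_closes_triple_py line (closes_triple_py line)

-- ===== LEMMAS AND PROOFS =====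

-- opener/closer predicates both ports are reduced to
def OpenerAt (s : List Char) (q : Char) (a : Nat) : Prop := ('f' :: [q, q, q]) <+: s.drop a
def CloserAt (s : List Char) (q : Char) (b : Nat) : Prop := [q, q, q] <+: s.drop b
-- the common characterisation: an opener with a closer at or past its end
def GoodStr (s : List Char) (q : Char) : Prop :=
  ∃ a b, OpenerAt s q a ∧ a + 4 ≤ b ∧ CloserAt s q b

lemma openerAt_false_of_ge (s : List Char) (q : Char) (a : Nat) (h : s.length ≤ a) :
    ¬ OpenerAt s q a := by
  unfold OpenerAt
  rw [List.drop_eq_nil_of_le h]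
  simp

-- ---- A-side: pvACheck answers GoodStr ----
lemma pvACheck_iff (s : List Char) (q : Char) :
    pvACheck s [q, q, q] = true ↔ GoodStr s q := by
  unfold pvACheck GoodStr
  simp only []
  by_cases hf : 0 ≤ PySem.Chars.find s ('f' :: [q, q, q])
  · rw [if_pos hf]
    set idx := PySem.Chars.find s ('f' :: [q, q, q]) with hidx
    have hspec := PySem.Chars.find_spec (s := s) (sub := 'f' :: [q, q, q]) hf
    have hlen : (('f' :: [q, q, q]).length : Int) = 4 := by simp
    have hslice : PySem.Chars.slice s (some (idx + (('f' :: [q, q, q]).length : Int))) none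
        = s.drop (idx.toNat + 4) := by
      rw [hlen]
      have h04 : (0:Int) ≤ idx + 4 := by omega
      have := PySem.List.slice_from (xs := s) (a := idx + 4) h04
      have htn : (idx + 4).toNat = idx.toNat + 4 := by omega
      simp only [PySem.Chars.slice_eq_listSlice]
      rw [this, htn]
    rw [hslice]
    rw [← PySem.Chars.exists_prefix_drop_iff_isIn]
    constructor
    · rintro ⟨j, hj⟩
      refine ⟨idx.toNat, idx.toNat + 4 + j, hspec.1, by omega, ?_⟩
      unfold CloserAt
      rw [List.drop_drop] at hj
      exact hj
    · rintro ⟨a, b, h1, h2, h3⟩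
      have hmin : idx.toNat ≤ a := by
        by_contra hlt
        exact hspec.2 a (by omega) h1
      refine ⟨b - (idx.toNat + 4), ?_⟩
      rw [List.drop_drop]
      rw [show idx.toNat + 4 + (b - (idx.toNat + 4)) = b from by omega]
      exact h3
  · rw [if_neg hf]
    refine iff_of_false (by simp) ?_
    rintro ⟨a, b, h1, _, _⟩
    have : ('f' :: [q, q, q]) <:+: s := by
      exact (List.IsPrefix.isInfix h1).trans (List.IsSuffix.isInfix (List.drop_suffix a s))
    exact hf ((PySem.Chars.find_nonneg_iff (s := s) (sub := 'f' :: [q, q, q])).mpr this)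

-- ---- B-side: a fuel-free spec of Chars.splitOn ----
def pvSplitRec (sep : List Char) (hs : sep ≠ []) (l : List Char) : List (List Char) :=
  if h : sep.isPrefixOf l then
    [] :: pvSplitRec sep hs (l.drop sep.length)
  else
    match l with
    | [] => [[]]
    | c :: rest =>
      match pvSplitRec sep hs rest with
      | [] => [[]]
      | p :: ps => (c :: p) :: ps
termination_by l.length
decreasing_by
  · have h1 : sep <+: l := List.isPrefixOf_iff_prefix.mp h
    have h2 : 0 < sep.length := List.length_pos_of_ne_nil hs
    have h3 : sep.length ≤ l.length := h1.length_le
    simp only [List.length_drop]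
    omega
  · simp

lemma pvSplitRec_ne_nil (sep : List Char) (hs : sep ≠ []) (l : List Char) :
    pvSplitRec sep hs l ≠ [] := by
  rw [pvSplitRec]
  split
  · simp
  · split
    · simp
    · split <;> simp

lemma splitOn_go_eq (sep : List Char) (hs : sep ≠ []) :
    ∀ (fuel : Nat) (l cur : List Char) (acc : List (List Char)), l.length < fuel →
      PySem.Chars.splitOn.go sep fuel l cur acc =
        acc.reverse ++ (match pvSplitRec sep hs l with
          | [] => []
          | p :: ps => (cur.reverse ++ p) :: ps) := by
  intro fuel
  induction fuel with
  | zero => intro l cur acc h; omega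
  | succ n ihn =>
    intro l cur acc h
    rw [PySem.Chars.splitOn.go.eq_def]
    cases l with
    | nil =>
      have hnp : ¬ sep.isPrefixOf ([] : List Char) := by
        rw [List.isPrefixOf_iff_prefix, List.prefix_nil]
        exact hs
      dsimp only
      rw [pvSplitRec, dif_neg hnp]
      simp
    | cons c rest =>
      have hsl : 0 < sep.length := List.length_pos_of_ne_nil hs
      dsimp only
      rw [pvSplitRec]
      by_cases hpre : sep.isPrefixOf (c :: rest)
      · rw [dif_pos hpre, if_pos hpre]
        rw [ihn _ _ _ (by simp only [List.length_drop]; simp at h ⊢; omega)]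
        obtain ⟨p, ps, hP⟩ : ∃ p ps, pvSplitRec sep hs ((c :: rest).drop sep.length) = p :: ps := by
          rcases hE : pvSplitRec sep hs ((c :: rest).drop sep.length) with _ | ⟨p, ps⟩
          · exact absurd hE (pvSplitRec_ne_nil sep hs _)
          · exact ⟨p, ps, rfl⟩
        rw [hP]
        simp
      · rw [dif_neg hpre, if_neg hpre]
        rw [ihn _ _ _ (by simp at h ⊢; omega)]
        obtain ⟨p, ps, hP⟩ : ∃ p ps, pvSplitRec sep hs rest = p :: ps := by
          rcases hE : pvSplitRec sep hs rest with _ | ⟨p, ps⟩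
          · exact absurd hE (pvSplitRec_ne_nil sep hs _)
          · exact ⟨p, ps, rfl⟩
        rw [hP]
        simp [hP]

lemma splitOn_eq (sep : List Char) (hs : sep ≠ []) (s : List Char) :
    PySem.Chars.splitOn s sep = pvSplitRec sep hs s := by
  rw [PySem.Chars.splitOn.eq_def, splitOn_go_eq sep hs (s.length + 1) s [] [] (by omega)]
  obtain ⟨p, ps, hP⟩ : ∃ p ps, pvSplitRec sep hs s = p :: ps := by
    rcases hE : pvSplitRec sep hs s with _ | ⟨p, ps⟩
    · exact absurd hE (pvSplitRec_ne_nil sep hs _)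
    · exact ⟨p, ps, rfl⟩
  rw [hP]
  simp

-- ---- occurrence shift lemmas ----
lemma closerAt_cons_succ (c : Char) (rest : List Char) (q : Char) (b : Nat) :
    CloserAt (c :: rest) q (b + 1) ↔ CloserAt rest q b := by
  unfold CloserAt
  rw [List.drop_succ_cons]

lemma openerAt_cons_succ (c : Char) (rest : List Char) (q : Char) (a : Nat) :
    OpenerAt (c :: rest) q (a + 1) ↔ OpenerAt rest q a := by
  unfold OpenerAt
  rw [List.drop_succ_cons]

lemma hasOcc_cons (sep : List Char) (c : Char) (rest : List Char) :
    (∃ b, sep <+: (c :: rest).drop b) ↔ (sep <+: (c :: rest)) ∨ ∃ b, sep <+: rest.drop b := by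
  constructor
  · rintro ⟨b, hb⟩
    cases b with
    | zero => exact Or.inl hb
    | succ b => exact Or.inr ⟨b, by rwa [List.drop_succ_cons] at hb⟩
  · rintro (h | ⟨b, hb⟩)
    · exact ⟨0, h⟩
    · exact ⟨b + 1, by rwa [List.drop_succ_cons]⟩

lemma hasOcc_shift3 (l : List Char) (q : Char) :
    (∃ b, 3 ≤ b ∧ CloserAt l q b) ↔ ∃ b, CloserAt (l.drop 3) q b := by
  unfold CloserAt
  constructor
  · rintro ⟨b, h3, hb⟩
    refine ⟨b - 3, ?_⟩
    rw [List.drop_drop, show 3 + (b - 3) = b from by omega]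
    exact hb
  · rintro ⟨b, hb⟩
    refine ⟨b + 3, by omega, ?_⟩
    rw [List.drop_drop, show 3 + b = b + 3 from by omega] at hb
    exact hb

lemma goodStr_cons (c : Char) (rest : List Char) (q : Char) :
    GoodStr (c :: rest) q ↔
      (c = 'f' ∧ [q, q, q] <+: rest ∧ ∃ b, 3 ≤ b ∧ CloserAt rest q b) ∨ GoodStr rest q := by
  unfold GoodStr
  constructor
  · rintro ⟨a, b, h1, h2, h3⟩
    cases a with
    | zero =>
      left
      unfold OpenerAt at h1
      rw [List.drop_zero, List.cons_prefix_cons] at h1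
      obtain ⟨b', rfl⟩ : ∃ b', b = b' + 1 := ⟨b - 1, by omega⟩
      exact ⟨h1.1.symm, h1.2, b', by omega, (closerAt_cons_succ c rest q b').mp h3⟩
    | succ a =>
      right
      obtain ⟨b', rfl⟩ : ∃ b', b = b' + 1 := ⟨b - 1, by omega⟩
      exact ⟨a, b', (openerAt_cons_succ c rest q a).mp h1, by omega,
        (closerAt_cons_succ c rest q b').mp h3⟩
  · rintro (⟨rfl, hp, b, h3, hb⟩ | ⟨a, b, h1, h2, h3⟩)
    · refine ⟨0, b + 1, ?_, by omega, (closerAt_cons_succ _ rest q b).mpr hb⟩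
      unfold OpenerAt
      rw [List.drop_zero, List.cons_prefix_cons]
      exact ⟨rfl, hp⟩
    · exact ⟨a + 1, b + 1, (openerAt_cons_succ c rest q a).mpr h1, by omega,
        (closerAt_cons_succ c rest q b).mpr h3⟩

lemma goodStr_cons_of_ne (c : Char) (rest : List Char) (q : Char) (hc : c ≠ 'f') :
    GoodStr (c :: rest) q ↔ GoodStr rest q := by
  rw [goodStr_cons]
  constructor
  · rintro (⟨h, _⟩ | h)
    · exact absurd h hc
    · exact h
  · exact Or.inr

lemma goodStr_nil (q : Char) : ¬ GoodStr [] q := by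
  rintro ⟨a, b, h1, _, _⟩
  exact openerAt_false_of_ge [] q a (by simp) h1

-- ends-with-'f' characterisation
lemma ends_f_iff (p : List Char) :
    PySem.Chars.endswith p ['f'] = true ↔ ∃ t, p = t ++ ['f'] := by
  rw [PySem.Chars.endswith_iff]
  constructor
  · rintro ⟨t, h⟩; exact ⟨t, h.symm⟩
  · rintro ⟨t, h⟩; exact ⟨t, h.symm⟩

lemma ends_f_cons (c : Char) (p : List Char) (hp : p ≠ []) :
    PySem.Chars.endswith (c :: p) ['f'] = PySem.Chars.endswith p ['f'] := by
  rw [Bool.eq_iff_iff, ends_f_iff, ends_f_iff]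
  constructor
  · rintro ⟨t, ht⟩
    cases t with
    | nil =>
      simp only [List.nil_append] at ht
      exact absurd (by simpa using congrArg List.tail ht) hp
    | cons d t =>
      exact ⟨t, by simpa using congrArg List.tail ht⟩
  · rintro ⟨t, rfl⟩
    exact ⟨c :: t, rfl⟩

lemma ends_f_nil : PySem.Chars.endswith [] ['f'] = false := by decide

-- the number of split parts detects an occurrence of sep
lemma split_cons_eq (sep : List Char) (hs : sep ≠ []) (c : Char) (rest : List Char)
    (hpre : ¬ sep.isPrefixOf (c :: rest)) (p : List Char) (ps : List (List Char))
    (hP : pvSplitRec sep hs rest = p :: ps) :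
    pvSplitRec sep hs (c :: rest) = (c :: p) :: ps := by
  rw [pvSplitRec, dif_neg hpre]
  dsimp only
  rw [hP]

lemma split_head_nil (sep : List Char) (hs : sep ≠ []) (l : List Char) (p : List Char)
    (ps : List (List Char)) (h : pvSplitRec sep hs l = [] :: p :: ps) :
    sep.isPrefixOf l ∧ pvSplitRec sep hs (l.drop sep.length) = p :: ps := by
  rw [pvSplitRec] at h
  by_cases hpre : sep.isPrefixOf l
  · rw [dif_pos hpre] at h
    exact ⟨hpre, List.tail_eq_of_cons_eq h⟩
  · rw [dif_neg hpre] at h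
    exfalso
    rcases l with _ | ⟨c, rest⟩
    · simp at h
    · dsimp only at h
      rcases hE : pvSplitRec sep hs rest with _ | ⟨p', ps'⟩
      · exact pvSplitRec_ne_nil sep hs rest hE
      · rw [hE] at h
        simp at h

lemma two_le_split_iff (sep : List Char) (hs : sep ≠ []) (l : List Char) :
    2 ≤ (pvSplitRec sep hs l).length ↔ ∃ b, sep <+: l.drop b := by
  induction' hn : l.length using Nat.strong_induction_on with n ih generalizing l
  subst hn
  by_cases hpre : sep.isPrefixOf l
  · have hL : pvSplitRec sep hs l = [] :: pvSplitRec sep hs (l.drop sep.length) := by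
      rw [pvSplitRec, dif_pos hpre]
    rw [hL]
    refine iff_of_true ?_ ⟨0, by rw [List.drop_zero]; exact List.isPrefixOf_iff_prefix.mp hpre⟩
    have := List.length_pos_of_ne_nil (pvSplitRec_ne_nil sep hs (l.drop sep.length))
    simp only [List.length_cons]
    omega
  · rcases l with _ | ⟨c, rest⟩
    · rw [pvSplitRec, dif_neg hpre]
      refine iff_of_false (by simp) ?_
      rintro ⟨b, hb⟩
      rw [List.drop_nil, List.prefix_nil] at hb
      exact hs hb
    · obtain ⟨p, ps, hP⟩ : ∃ p ps, pvSplitRec sep hs rest = p :: ps := by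
        rcases hE : pvSplitRec sep hs rest with _ | ⟨p, ps⟩
        · exact absurd hE (pvSplitRec_ne_nil sep hs _)
        · exact ⟨p, ps, rfl⟩
      rw [split_cons_eq sep hs c rest hpre p ps hP]
      have hlen : ((c :: p) :: ps).length = (pvSplitRec sep hs rest).length := by
        rw [hP]; simp
      rw [hlen, ih rest.length (by simp) rest rfl, hasOcc_cons sep c rest]
      constructor
      · exact Or.inr
      · rintro (h | h)
        · exact absurd (List.isPrefixOf_iff_prefix.mpr h) hpre
        · exact h

-- GoodStr forces at least three split parts
lemma good_triple_prefix (m : List Char) (q : Char) (hq : q ≠ 'f') :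
    GoodStr ([q, q, q] ++ m) q ↔ GoodStr m q := by
  show GoodStr (q :: q :: q :: m) q ↔ GoodStr m q
  rw [goodStr_cons_of_ne q _ q hq, goodStr_cons_of_ne q _ q hq, goodStr_cons_of_ne q _ q hq]

lemma good_hasOcc (l : List Char) (q : Char) (hg : GoodStr l q) :
    ∃ b, ([q, q, q] : List Char) <+: l.drop b := by
  obtain ⟨a, b, _, _, h3⟩ := hg
  exact ⟨b, h3⟩

lemma three_le_split_of_good (q : Char) (hq : q ≠ 'f') (hs : ([q, q, q] : List Char) ≠ [])
    (l : List Char) (hg : GoodStr l q) : 3 ≤ (pvSplitRec [q, q, q] hs l).length := by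
  induction' hn : l.length using Nat.strong_induction_on with n ih generalizing l
  subst hn
  by_cases hpre : ([q, q, q] : List Char).isPrefixOf l
  · obtain ⟨m, rfl⟩ := List.isPrefixOf_iff_prefix.mp hpre
    have hL : pvSplitRec [q, q, q] hs ([q, q, q] ++ m) = [] :: pvSplitRec [q, q, q] hs m := by
      rw [pvSplitRec, dif_pos hpre]
      simp
    rw [hL]
    have hgm : GoodStr m q := (good_triple_prefix m q hq).mp hg
    have h2 : 2 ≤ (pvSplitRec [q, q, q] hs m).length :=
      (two_le_split_iff [q, q, q] hs m).mpr (good_hasOcc m q hgm)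
    simp only [List.length_cons]
    omega
  · rcases l with _ | ⟨c, rest⟩
    · exact absurd hg (goodStr_nil q)
    · obtain ⟨p, ps, hP⟩ : ∃ p ps, pvSplitRec [q, q, q] hs rest = p :: ps := by
        rcases hE : pvSplitRec [q, q, q] hs rest with _ | ⟨p, ps⟩
        · exact absurd hE (pvSplitRec_ne_nil _ hs _)
        · exact ⟨p, ps, rfl⟩
      rw [split_cons_eq [q, q, q] hs c rest hpre p ps hP]
      have hlen : ((c :: p) :: ps).length = (pvSplitRec [q, q, q] hs rest).length := by
        rw [hP]; simp
      rw [hlen]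
      rcases (goodStr_cons c rest q).mp hg with ⟨rfl, hp, b, h3, hb⟩ | hgr
      · -- opener at position 0: rest starts with the triple, a closer sits past it
        have hpr : ([q, q, q] : List Char).isPrefixOf rest := List.isPrefixOf_iff_prefix.mpr hp
        have hL : pvSplitRec [q, q, q] hs rest =
            [] :: pvSplitRec [q, q, q] hs (rest.drop 3) := by
          rw [pvSplitRec, dif_pos hpr]
          simp
        have h2 : 2 ≤ (pvSplitRec [q, q, q] hs (rest.drop 3)).length := by
          rw [two_le_split_iff]
          exact (hasOcc_shift3 rest q).mp ⟨b, h3, hb⟩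
        rw [hL]
        simp only [List.length_cons]
        omega
      · exact ih rest.length (by simp) rest hgr rfl

lemma ends_f_singleton (c : Char) :
    PySem.Chars.endswith [c] ['f'] = true ↔ c = 'f' := by
  rw [ends_f_iff]
  constructor
  · rintro ⟨t, ht⟩
    have hlen := congrArg List.length ht
    simp at hlen
    rw [hlen] at ht
    simpa using ht
  · rintro rfl
    exact ⟨[], rfl⟩

-- main characterisation of B's split test
lemma splitParts_iff (q : Char) (hq : q ≠ 'f') (hs : ([q, q, q] : List Char) ≠ [])
    (l : List Char) :
    (∃ p ∈ (pvSplitRec [q, q, q] hs l).take ((pvSplitRec [q, q, q] hs l).length - 2),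
        PySem.Chars.endswith p ['f'] = true) ↔ GoodStr l q := by
  induction' hn : l.length using Nat.strong_induction_on with n ih generalizing l
  subst hn
  by_cases hpre : ([q, q, q] : List Char).isPrefixOf l
  · obtain ⟨m, rfl⟩ := List.isPrefixOf_iff_prefix.mp hpre
    have hL : pvSplitRec [q, q, q] hs ([q, q, q] ++ m) = [] :: pvSplitRec [q, q, q] hs m := by
      rw [pvSplitRec, dif_pos hpre]
      simp
    set P := pvSplitRec [q, q, q] hs m with hPdef
    rw [hL]
    by_cases h2 : 2 ≤ P.length
    · have ht : ([] :: P).take (([] :: P).length - 2) = [] :: P.take (P.length - 2) := by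
        simp only [List.length_cons]
        rw [show P.length + 1 - 2 = (P.length - 2) + 1 from by omega, List.take_succ_cons]
      rw [ht, good_triple_prefix m q hq, ← ih m.length (by simp; omega) m rfl]
      constructor
      · rintro ⟨x, hx, he⟩
        rcases List.mem_cons.mp hx with rfl | hx'
        · rw [ends_f_nil] at he
          exact absurd he (by simp)
        · exact ⟨x, hx', he⟩
      · rintro ⟨x, hx, he⟩
        exact ⟨x, List.mem_cons_of_mem _ hx, he⟩
    · refine iff_of_false ?_ ?_
      · rintro ⟨x, hx, _⟩
        rw [show ([] :: P).take (([] :: P).length - 2) = [] from by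
          simp only [List.length_cons]
          rw [show P.length + 1 - 2 = 0 from by
            have := List.length_pos_of_ne_nil (pvSplitRec_ne_nil [q, q, q] hs m)
            omega]
          rfl] at hx
        simp at hx
      · intro hg
        exact h2 ((two_le_split_iff _ hs m).mpr
          (good_hasOcc m q ((good_triple_prefix m q hq).mp hg)))
  · rcases l with _ | ⟨c, rest⟩
    · have hL : pvSplitRec [q, q, q] hs [] = [[]] := by
        rw [pvSplitRec, dif_neg hpre]
      rw [hL]
      refine iff_of_false (by simp) (goodStr_nil q)
    · obtain ⟨p, ps, hP⟩ : ∃ p ps, pvSplitRec [q, q, q] hs rest = p :: ps := by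
        rcases hE : pvSplitRec [q, q, q] hs rest with _ | ⟨p, ps⟩
        · exact absurd hE (pvSplitRec_ne_nil _ hs _)
        · exact ⟨p, ps, rfl⟩
      have hCP := split_cons_eq [q, q, q] hs c rest hpre p ps hP
      rw [hCP]
      by_cases h2 : 2 ≤ ps.length
      · have ht : ((c :: p) :: ps).take (((c :: p) :: ps).length - 2)
            = (c :: p) :: ps.take (ps.length - 2) := by
          simp only [List.length_cons]
          rw [show ps.length + 1 - 2 = (ps.length - 2) + 1 from by omega, List.take_succ_cons]
        rw [ht]
        have ihr := ih rest.length (by simp) rest rfl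
        rw [hP] at ihr
        have htr : (p :: ps).take ((p :: ps).length - 2) = p :: ps.take (ps.length - 2) := by
          simp only [List.length_cons]
          rw [show ps.length + 1 - 2 = (ps.length - 2) + 1 from by omega, List.take_succ_cons]
        rw [htr] at ihr
        by_cases hp : p = []
        · subst hp
          rcases ps with _ | ⟨p2, ps2⟩
          · simp at h2
          · obtain ⟨hpr, hD⟩ := split_head_nil [q, q, q] hs rest p2 ps2 hP
            have hD' : pvSplitRec [q, q, q] hs (rest.drop 3) = p2 :: ps2 := by
              simpa using hD
            have hocc : ∃ b, 3 ≤ b ∧ CloserAt rest q b := by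
              refine (hasOcc_shift3 rest q).mpr ?_
              refine (two_le_split_iff _ hs _).mp ?_
              rw [hD']
              simpa using h2
            rw [goodStr_cons c rest q]
            constructor
            · rintro ⟨x, hx, he⟩
              rcases List.mem_cons.mp hx with rfl | hx'
              · exact Or.inl ⟨(ends_f_singleton c).mp he, List.isPrefixOf_iff_prefix.mp hpr, hocc⟩
              · exact Or.inr (ihr.mp ⟨x, List.mem_cons_of_mem _ hx', he⟩)
            · rintro (⟨rfl, _, _⟩ | hgr)
              · exact ⟨['f'], List.mem_cons_self, (ends_f_singleton 'f').mpr rfl⟩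
              · obtain ⟨x, hx, he⟩ := ihr.mpr hgr
                rcases List.mem_cons.mp hx with rfl | hx'
                · rw [ends_f_nil] at he
                  exact absurd he (by simp)
                · exact ⟨x, List.mem_cons_of_mem _ hx', he⟩
        · have hnr : ¬ ([q, q, q] : List Char).isPrefixOf rest := by
            intro hr
            have hLr : pvSplitRec [q, q, q] hs rest
                = [] :: pvSplitRec [q, q, q] hs (rest.drop ([q, q, q] : List Char).length) := by
              rw [pvSplitRec, dif_pos hr]
            rw [hP] at hLr
            exact hp (List.head_eq_of_cons_eq hLr)
          have hGr : GoodStr (c :: rest) q ↔ GoodStr rest q := by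
            rw [goodStr_cons]
            constructor
            · rintro (⟨_, hpfx, _⟩ | h)
              · exact absurd (List.isPrefixOf_iff_prefix.mpr hpfx) hnr
              · exact h
            · exact Or.inr
          rw [hGr, ← ihr]
          constructor
          · rintro ⟨x, hx, he⟩
            rcases List.mem_cons.mp hx with rfl | hx'
            · rw [ends_f_cons c p hp] at he
              exact ⟨p, List.mem_cons_self, he⟩
            · exact ⟨x, List.mem_cons_of_mem _ hx', he⟩
          · rintro ⟨x, hx, he⟩
            rcases List.mem_cons.mp hx with rfl | hx'
            · exact ⟨c :: x, List.mem_cons_self, by rw [ends_f_cons c x hp]; exact he⟩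
            · exact ⟨x, List.mem_cons_of_mem _ hx', he⟩
      · refine iff_of_false ?_ ?_
        · rintro ⟨x, hx, _⟩
          rw [show ((c :: p) :: ps).take (((c :: p) :: ps).length - 2) = [] from by
            simp only [List.length_cons]
            rw [show ps.length + 1 - 2 = 0 from by omega]
            rfl] at hx
          simp at hx
        · intro hg
          have h3 := three_le_split_of_good q hq hs (c :: rest) hg
          rw [hCP] at h3
          simp only [List.length_cons] at h3
          omega

lemma pvBCheck_iff (s : List Char) (q : Char) (hq : q ≠ 'f') :
    pvBCheck s [q, q, q] = true ↔ GoodStr s q := by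
  have hs : ([q, q, q] : List Char) ≠ [] := by simp
  unfold pvBCheck
  rw [splitOn_eq [q, q, q] hs s]
  rw [PySem.List.slice_to_neg_ofNat _ 2 (by norm_num)]
  rw [List.any_eq_true]
  exact splitParts_iff q hq hs s

-- ===== VERDICT (by name: the statement is the Claim_ definition above) =====
theorem closes_triple_py_spec : Claim_equal_closes_triple_py := by
  intro line _
  unfold Spec_closes_triple_py closes_triple_py closes_triple_py_alt
  rw [show pvACheck line.toList ['"','"','"'] = pvBCheck line.toList ['"','"','"'] from ?_,
      show pvACheck line.toList ['\'','\'','\''] = pvBCheck line.toList ['\'','\'','\''] from ?_]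
  · rcases Bool.eq_false_or_eq_true (pvBCheck line.toList ['"','"','"'] ) with h1 | h1 <;>
      rcases Bool.eq_false_or_eq_true (pvBCheck line.toList ['\'','\'','\''] ) with h2 | h2 <;>
        simp [h1, h2]
  · rw [Bool.eq_iff_iff, pvACheck_iff, pvBCheck_iff _ _ (by decide)]
  · rw [Bool.eq_iff_iff, pvACheck_iff, pvBCheck_iff _ _ (by decide)]
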